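-- pv_equiv track=rewrite | github.com/woojerry/Algorithms | Programmers/2111/폰켓몬.py | solution
-- ===== SOURCE A (Python) =====
-- def solution(nums):
--     answer = 0
--
--     dic = {}
--     for i in nums:
--         dic[i] = dic.get(i, 0) + 1
--
--     if len(dic) >= len(nums) / 2:
--         answer = len(nums) // 2
--     else:
--         answer = len(dic)
--
--     return answer
-- ===== SOURCE B (Python) =====
-- def solution(nums):
--     s = sorted(nums)
--     distinct = 0
--     prev = None
--     for x in s:
--         if prev is None or x != prev:
--             distinct += 1
--         prev = x
--     return min(distinct, len(nums) // 2)
-- ===== Notes on version B (the rewrite author's own statement) =====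
-- stated objective: alternative
-- what changed: Replaces the frequency-dict build and branch with a sort-then-scan that counts runs of equal adjacent values and returns min(distinct, len(nums)//2).
import Mathlib
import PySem

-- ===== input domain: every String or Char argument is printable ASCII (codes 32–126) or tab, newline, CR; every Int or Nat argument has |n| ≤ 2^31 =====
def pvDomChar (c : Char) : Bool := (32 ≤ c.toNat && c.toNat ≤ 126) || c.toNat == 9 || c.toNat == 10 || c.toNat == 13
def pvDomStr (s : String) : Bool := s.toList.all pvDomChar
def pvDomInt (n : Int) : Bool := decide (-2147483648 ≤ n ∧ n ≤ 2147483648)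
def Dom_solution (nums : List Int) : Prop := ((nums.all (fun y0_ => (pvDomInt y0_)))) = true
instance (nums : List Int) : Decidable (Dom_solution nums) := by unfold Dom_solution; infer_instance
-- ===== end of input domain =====

-- B replaces A's frequency-dict build and branch with a sort-then-scan run count returning min(distinct, len//2); alternative decomposition, same result.


-- ===== PORT A =====
-- Python: len(dic) >= len(nums) / 2 compares an int with an exact float (n/2 is exact for
-- |n| ≤ 2^31 < 2^52); it is exactly the integer comparison 2*len(dic) ≥ len(nums).
def solution (nums : List Int) : Int :=
  let dic := nums.foldl (fun d i => d.insert i (d.getD i 0 + 1)) PySem.Dict.empty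
  if 2 * (dic.size : Int) ≥ (nums.length : Int) then
    PySem.Int.floordiv (nums.length : Int) 2
  else
    (dic.size : Int)

-- ===== PORT B =====
-- the for-loop of Source B: prev = None head step, then the tail scan carrying prev
def solAltScan (prev : Int) : List Int → Int
  | [] => 0
  | x :: rest => (if x ≠ prev then 1 else 0) + solAltScan x rest

def solAltDistinct : List Int → Int
  | [] => 0
  | x :: rest => 1 + solAltScan x rest

def solution_alt (nums : List Int) : Int :=
  min (solAltDistinct (PySem.List.sorted nums (fun x => x) false))
      (PySem.Int.floordiv (nums.length : Int) 2)

-- ===== PRECONDITION & SPEC =====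
def Spec_solution (nums : List Int) (out : Int) : Prop := out = solution_alt nums
instance (nums : List Int) (out : Int) : Decidable (Spec_solution nums out) := by unfold Spec_solution; infer_instance

-- ===== CLAIM (what is proved, stated in full; the proofs are below) =====
def Claim_equal_solution : Prop := ∀ (nums : List Int), Dom_solution nums → Spec_solution nums (solution nums)

-- ===== LEMMAS AND PROOFS =====

-- the tail scan counts the distinct values of l other than prev, on a sorted suffix
theorem solAltScan_eq (prev : Int) (l : List Int)
    (hs : l.Pairwise (· ≤ ·)) (hge : ∀ x ∈ l, prev ≤ x) :
    solAltScan prev l = ((l.toFinset.erase prev).card : Int) := by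
  induction l generalizing prev with
  | nil => simp [solAltScan]
  | cons x rest ih =>
    have hs' : rest.Pairwise (· ≤ ·) := (List.pairwise_cons.mp hs).2
    have hxrest : ∀ y ∈ rest, x ≤ y := (List.pairwise_cons.mp hs).1
    have hpx : prev ≤ x := hge x (by simp)
    by_cases hx : x = prev
    · subst hx
      rw [solAltScan]
      simp only [ne_eq, not_true_eq_false, ite_false, zero_add]
      rw [ih x hs' hxrest]
      have hfe : (x :: rest).toFinset.erase x = rest.toFinset.erase x := by
        ext y
        simp only [Finset.mem_erase, List.mem_toFinset, List.mem_cons]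
        constructor
        · rintro ⟨hy, hy2 | hy2⟩
          · exact absurd hy2 hy
          · exact ⟨hy, hy2⟩
        · rintro ⟨hy, hy2⟩; exact ⟨hy, Or.inr hy2⟩
      rw [hfe]
    · have hplt : prev < x := lt_of_le_of_ne hpx (fun h => hx h.symm)
      rw [solAltScan]
      simp only [ne_eq, hx, not_false_eq_true, ite_true]
      rw [ih x hs' hxrest]
      have hrest_prev : prev ∉ rest.toFinset := by
        simp only [List.mem_toFinset]
        intro hmem
        exact absurd (hxrest prev hmem) (not_le.mpr hplt)
      have : (x :: rest).toFinset.erase prev = insert x (rest.toFinset.erase x) := by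
        ext y
        simp only [Finset.mem_erase, List.mem_toFinset, List.mem_cons, Finset.mem_insert]
        constructor
        · rintro ⟨hy, hy2 | hy2⟩
          · exact Or.inl hy2
          · by_cases hyx : y = x
            · exact Or.inl hyx
            · exact Or.inr ⟨hyx, hy2⟩
        · rintro (hy | ⟨hy1, hy2⟩)
          · subst hy; exact ⟨hx, Or.inl rfl⟩
          · refine ⟨?_, Or.inr hy2⟩
            intro h; subst h
            exact hrest_prev (List.mem_toFinset.mpr hy2)
      rw [this, Finset.card_insert_of_notMem (by simp)]
      push_cast
      ring

-- the whole scan counts the distinct values of a sorted list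
theorem solAltDistinct_eq (l : List Int) (hs : l.Pairwise (· ≤ ·)) :
    solAltDistinct l = (l.toFinset.card : Int) := by
  cases l with
  | nil => simp [solAltDistinct]
  | cons x rest =>
    rw [solAltDistinct,
      solAltScan_eq x rest (List.pairwise_cons.mp hs).2 (List.pairwise_cons.mp hs).1]
    have : (x :: rest).toFinset = insert x (rest.toFinset.erase x) := by
      ext y
      by_cases hyx : y = x <;> simp [hyx]
    rw [this, Finset.card_insert_of_notMem (by simp)]
    push_cast
    ring

-- A's dict has one key per distinct value of nums
theorem dic_size_eq (nums : List Int) :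
    (nums.foldl (fun d i => d.insert i (d.getD i 0 + 1)) PySem.Dict.empty).size
      = nums.toFinset.card := by
  have hkeys : (nums.foldl (fun d i => d.insert i (d.getD i 0 + 1)) PySem.Dict.empty).keys
      = PySem.Set.update (PySem.Dict.empty (κ := Int) (ν := Int)).keys nums :=
    PySem.Dict.keys_foldl_insert nums (fun d i => d.getD i 0 + 1) _
  have hsize : (nums.foldl (fun d i => d.insert i (d.getD i 0 + 1)) PySem.Dict.empty).size
      = (nums.foldl (fun d i => d.insert i (d.getD i 0 + 1)) PySem.Dict.empty).keys.length := by
    simp [PySem.Dict.size, PySem.Dict.keys]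
  rw [hsize, hkeys]
  have hupd : PySem.Set.update (PySem.Dict.empty (κ := Int) (ν := Int)).keys nums
      = PySem.Set.ofList nums := by
    rw [PySem.Dict.keys_empty, PySem.Set.ofList_eq_foldl]
    rfl
  rw [hupd]
  have hnd : (PySem.Set.ofList nums).Nodup := PySem.Set.nodup_ofList nums
  have hfin : (PySem.Set.ofList nums).toFinset = nums.toFinset := by
    ext y; simp [PySem.Set.mem_ofList]
  rw [← List.toFinset_card_of_nodup hnd, hfin]

-- ===== VERDICT (by name: the statement is the Claim_ definition above) =====
theorem solution_spec : Claim_equal_solution := by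
  intro nums _
  show solution nums = solution_alt nums
  have hzeta : solution nums =
      (if 2 * (((nums.foldl (fun d i => d.insert i (d.getD i 0 + 1)) PySem.Dict.empty).size : Int))
          ≥ (nums.length : Int) then PySem.Int.floordiv (nums.length : Int) 2
       else ((nums.foldl (fun d i => d.insert i (d.getD i 0 + 1)) PySem.Dict.empty).size : Int)) := rfl
  rw [hzeta, dic_size_eq nums]
  unfold solution_alt
  have hsorted := PySem.List.sorted_pairwise (xs := nums) (key := fun x : Int => x)
  have hdist := solAltDistinct_eq _ hsorted
  have hfin : (PySem.List.sorted nums (fun x => x) false).toFinset = nums.toFinset := by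
    ext y; simp [PySem.List.mem_sorted]
  rw [hdist, hfin]
  have hcard : nums.toFinset.card ≤ nums.length := nums.toFinset_card_le
  rw [PySem.Int.floordiv_eq_ediv_of_pos (by norm_num)]
  have h2 : ((nums.length : Int) / 2) = ((nums.length / 2 : Nat) : Int) := by
    omega
  rw [h2]
  split_ifs with h
  · have : nums.length ≤ 2 * nums.toFinset.card := by exact_mod_cast h
    have : nums.length / 2 ≤ nums.toFinset.card := by omega
    exact (min_eq_right (by exact_mod_cast this)).symm
  · have : 2 * nums.toFinset.card < nums.length := by
      by_contra hc
      exact h (by exact_mod_cast not_lt.mp hc)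
    have : nums.toFinset.card ≤ nums.length / 2 := by omega
    exact (min_eq_left (by exact_mod_cast this)).symm
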